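-- pv_equiv track=rewrite | github.com/GwendolineFct/gruescript | src/scrapper.py | cleanup_type
-- ===== SOURCE A (Python) =====
-- def singularize(plural: str) -> str:
--     """
--     return singular of a plural
--     used to turn `list of strings` in `list(string)`
--     """
--
--     if plural.endswith("ies"):
--         return plural[:-3] + "y"
--     if plural.endswith("s"):
--         return plural[:-1]
--     return plural
--
-- def cleanup_type(atype: str, subtype: str = None) -> str:
--     """
--     Cleans up type that was provided by ansible doc
--         `-`, `None` or blank -> `raw`
--         `dict` -> `dictionary`
--         `list(things)` -> `list(thing)`
--         `list of things` -> `list(thing)`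
--     """
--
--     if atype is None or atype == "-" or atype == "None" or atype == "NoneType" or atype == "":
--         return "raw"
--     if atype == "dict":
--         return "dictionary"
--     elif atype == "list":
--         return f"list({singularize(cleanup_type(subtype))})"
--     elif atype.startswith("list of "):
--         subtype = atype[len('list of '):].strip()
--         return cleanup_type("list", subtype)
--     return atype
-- ===== SOURCE B (Python) =====
-- def singularize(plural: str) -> str:
--     if plural.endswith("ies"):
--         return plural[:-3] + "y"
--     if plural.endswith("s"):
--         return plural[:-1]
--     return plural
--
-- def cleanup_type(atype: str, subtype: str = None) -> str:
--     # Iterative: peel all 'list'/'list of ' wrappers counting them, map the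
--     # innermost name to its canonical base, singularize once, then re-wrap.
--     wraps = 0
--     cur, sub = atype, subtype
--     while True:
--         if cur == "list":
--             cur, sub = sub, None
--             wraps += 1
--         elif cur is not None and cur.startswith("list of "):
--             cur, sub = cur[len("list of "):].strip(), None
--             wraps += 1
--         else:
--             break
--     if cur is None or cur in ("-", "None", "NoneType", ""):
--         base = "raw"
--     elif cur == "dict":
--         base = "dictionary"
--     else:
--         base = cur
--     if wraps == 0:
--         return base
--     base = singularize(base)
--     for _ in range(wraps):
--         base = "list(" + base + ")"
--     return base
-- ===== Notes on version B (the rewrite author's own statement) =====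
-- stated objective: alternative
-- what changed: Replaces A's recursive descent through nested list wrappers with a single iterative peeling loop that counts the wrappers, canonicalizes the innermost type name once, applies singularize once (it is a no-op on already-wrapped results), and then re-wraps that many times.
import Mathlib
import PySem

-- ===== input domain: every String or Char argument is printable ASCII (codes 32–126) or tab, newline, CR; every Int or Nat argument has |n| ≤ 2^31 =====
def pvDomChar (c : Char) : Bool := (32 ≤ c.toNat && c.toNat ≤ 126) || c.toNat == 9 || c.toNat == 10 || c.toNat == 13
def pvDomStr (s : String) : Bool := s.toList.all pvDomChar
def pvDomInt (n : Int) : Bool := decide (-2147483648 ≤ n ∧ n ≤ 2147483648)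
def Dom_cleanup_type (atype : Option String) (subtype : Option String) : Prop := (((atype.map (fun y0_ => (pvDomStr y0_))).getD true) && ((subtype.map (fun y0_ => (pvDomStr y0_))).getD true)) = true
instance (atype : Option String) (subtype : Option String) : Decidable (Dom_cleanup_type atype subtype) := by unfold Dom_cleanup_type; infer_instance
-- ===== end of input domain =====

-- ===== PORT A =====
-- B replaces A's recursion by an iterative wrapper-peeling loop (alternative decomposition; no speed claim).
def singularize (plural : String) : String :=
  if PySem.Str.endswith plural "ies" then PySem.Str.slice plural none (some (-3)) ++ "y"
  else if PySem.Str.endswith plural "s" then PySem.Str.slice plural none (some (-1))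
  else plural

def pvMu (o : Option String) : Nat := ((o.map (fun s => s.toList.length)).getD 0)

theorem pvStrip_len_le (s : List Char) : (PySem.Chars.strip s).length ≤ s.length := by
  unfold PySem.Chars.strip PySem.Chars.rstrip PySem.Chars.lstrip
  have h1 := List.length_dropWhile_le (p := PySem.Chars.isspace)
    (l := (List.dropWhile PySem.Chars.isspace s).reverse)
  have h2 := List.length_dropWhile_le (p := PySem.Chars.isspace) (l := s)
  simp only [List.length_reverse] at *
  omega

theorem pvSlice8L (a : String) : PySem.List.slice a.toList (some (8:Int)) none = a.toList.drop 8 := by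
  rw [PySem.List.slice_from a.toList (by norm_num : (0:Int) ≤ 8)]
  rfl

theorem pvTail_len (a : String) (h : PySem.Str.startswith a "list of " = true) :
    (PySem.Str.strip (PySem.Str.slice a (some 8) none)).toList.length + 8 ≤ a.toList.length := by
  have hpre : ("list of ".toList) <+: a.toList := by
    simpa [PySem.Str.startswith, PySem.Chars.startswith, List.isPrefixOf_iff_prefix] using h
  have hlen : 8 ≤ a.toList.length := by
    have := hpre.length_le; simpa using this
  have hstrip : (PySem.Str.strip (PySem.Str.slice a (some 8) none)).toList
      = PySem.Chars.strip (a.toList.drop 8) := by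
    simp [PySem.Str.strip, PySem.Str.slice, PySem.Chars.slice_eq_listSlice, pvSlice8L]
  rw [hstrip]
  have h1 := pvStrip_len_le (a.toList.drop 8)
  have h2 : (a.toList.drop 8).length = a.toList.length - 8 := by simp
  omega

def cleanup_type (atype : Option String) (subtype : Option String) : String :=
  match atype with
  | none => "raw"
  | some a =>
    if a == "-" || a == "None" || a == "NoneType" || a == "" then "raw"
    else if a == "dict" then "dictionary"
    else if a == "list" then "list(" ++ singularize (cleanup_type subtype none) ++ ")"
    else if PySem.Str.startswith a "list of " then
      cleanup_type (some "list") (some (PySem.Str.strip (PySem.Str.slice a (some 8) none)))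
    else a
termination_by pvMu atype + pvMu subtype
decreasing_by
  · simp_all [pvMu]; decide
  · rename_i h
    have h8 := pvTail_len a h
    simp only [pvMu, Option.map_some, Option.getD_some]
    have h4 : ("list" : String).toList.length = 4 := by decide
    omega

-- ===== PORT B =====
def peelB (cur : Option String) (sub : Option String) (w : Nat) : Nat × Option String :=
  match cur with
  | none => (w, none)
  | some a =>
    if a == "list" then peelB sub none (w + 1)
    else if PySem.Str.startswith a "list of " then
      peelB (some (PySem.Str.strip (PySem.Str.slice a (some 8) none))) none (w + 1)
    else (w, some a)
termination_by pvMu cur + pvMu sub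
decreasing_by
  · simp_all [pvMu]; decide
  · rename_i h
    have h8 := pvTail_len a h
    simp only [pvMu, Option.map_some, Option.map_none, Option.getD_some, Option.getD_none]
    omega

def baseB (cur : Option String) : String :=
  match cur with
  | none => "raw"
  | some a =>
    if a == "-" || a == "None" || a == "NoneType" || a == "" then "raw"
    else if a == "dict" then "dictionary"
    else a

def wrapB : Nat → String → String
  | 0, x => x
  | n + 1, x => wrapB n ("list(" ++ x ++ ")")

def cleanup_type_alt (atype : Option String) (subtype : Option String) : String :=
  let p := peelB atype subtype 0
  let base := baseB p.2
  if p.1 == 0 then base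
  else wrapB p.1 (singularize base)

-- ===== PRECONDITION & SPEC =====
def Spec_cleanup_type (atype : Option String) (subtype : Option String) (out : String) : Prop := out = cleanup_type_alt atype subtype
instance (atype : Option String) (subtype : Option String) (out : String) : Decidable (Spec_cleanup_type atype subtype out) := by unfold Spec_cleanup_type; infer_instance

-- ===== CLAIM (what is proved, stated in full; the proofs are below) =====
def Claim_equal_cleanup_type : Prop := ∀ (atype : Option String) (subtype : Option String), Dom_cleanup_type atype subtype → Spec_cleanup_type atype subtype (cleanup_type atype subtype)

-- ===== LEMMAS AND PROOFS =====

theorem peelB_none (sub : Option String) (w : Nat) : peelB none sub w = (w, none) := by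
  rw [peelB]

theorem peelB_list (sub : Option String) (w : Nat) :
    peelB (some "list") sub w = peelB sub none (w + 1) := by
  rw [peelB]; norm_num

theorem peelB_listof (a : String) (sub : Option String) (w : Nat)
    (h1 : (a == "list") = false) (h2 : PySem.Str.startswith a "list of " = true) :
    peelB (some a) sub w
      = peelB (some (PySem.Str.strip (PySem.Str.slice a (some 8) none))) none (w + 1) := by
  rw [peelB]; simp only [h1, h2, Bool.false_eq_true, if_false, if_true]

theorem peelB_other (a : String) (sub : Option String) (w : Nat)
    (h1 : (a == "list") = false) (h2 : PySem.Str.startswith a "list of " = false) :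
    peelB (some a) sub w = (w, some a) := by
  rw [peelB]; simp only [h1, h2, Bool.false_eq_true, if_false]

theorem peelB_shift_aux (n : Nat) : ∀ (cur sub : Option String), pvMu cur + pvMu sub ≤ n →
    ∀ (w : Nat), peelB cur sub w = ((peelB cur sub 0).1 + w, (peelB cur sub 0).2) := by
  induction n using Nat.strong_induction_on with
  | _ n ih =>
    intro cur sub hle w
    match cur with
    | none => simp [peelB_none]
    | some a =>
      by_cases hl : (a == "list") = true
      · have ha : a = "list" := by simpa using hl
        subst ha
        rw [peelB_list, peelB_list]
        have hm : pvMu sub + pvMu none ≤ pvMu sub := by simp [pvMu]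
        have h4 : pvMu (some ("list" : String)) = 4 := by decide
        have hn : pvMu sub + pvMu (none : Option String) < n := by
          simp only [pvMu, Option.map_none, Option.getD_none] at *
          omega
        rw [ih _ hn sub none le_rfl (w + 1), ih _ hn sub none le_rfl 1]
        simp [Prod.ext_iff]
        omega
      · have hl' : (a == "list") = false := by simpa using hl
        by_cases hs : PySem.Str.startswith a "list of " = true
        · have h8 := pvTail_len a hs
          rw [peelB_listof a sub w hl' hs, peelB_listof a sub 0 hl' hs]
          have hn : pvMu (some (PySem.Str.strip (PySem.Str.slice a (some 8) none)))
              + pvMu (none : Option String) < n := by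
            simp only [pvMu, Option.map_some, Option.map_none, Option.getD_some,
              Option.getD_none] at *
            omega
          rw [ih _ hn _ none le_rfl (w + 1), ih _ hn _ none le_rfl 1]
          simp [Prod.ext_iff]
          omega
        · have hs' : PySem.Str.startswith a "list of " = false := by simpa using hs
          rw [peelB_other a sub w hl' hs', peelB_other a sub 0 hl' hs']
          simp

theorem peelB_shift (cur sub : Option String) (w : Nat) :
    peelB cur sub w = ((peelB cur sub 0).1 + w, (peelB cur sub 0).2) := by
  exact peelB_shift_aux (pvMu cur + pvMu sub) cur sub le_rfl w

theorem wrapB_succ (n : Nat) (x : String) :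
    wrapB (n + 1) x = "list(" ++ wrapB n x ++ ")" := by
  induction n generalizing x with
  | zero => simp [wrapB]
  | succ k ihk => rw [wrapB, ihk, wrapB]

theorem endswith_tail_ne (s : String) (p : List Char) (c : Char)
    (h : s.toList.getLast? = some ')') (hp : p.getLast? = some c) (hne : c ≠ ')') :
    PySem.Chars.endswith s.toList p = false := by
  rcases Bool.eq_false_or_eq_true (PySem.Chars.endswith s.toList p) with h1 | h0
  · exfalso
    have hsuf : p <:+ s.toList := by
      have := h1
      simp [PySem.Chars.endswith] at this
      exact List.isSuffixOf_iff_suffix.mp (by simpa using this)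
      
    rcases hsuf with ⟨t, ht⟩
    rw [← ht] at h
    rcases p with _ | ⟨d, q⟩
    · simp at hp
    · rw [List.getLast?_append_of_ne_nil _ (by simp)] at h
      rw [hp] at h
      exact hne (by simpa using h)
  · exact h0

theorem singularize_paren (s : String) (h : s.toList.getLast? = some ')') :
    singularize s = s := by
  have hies : PySem.Chars.endswith s.toList "ies".toList = false :=
    endswith_tail_ne s _ 's' h (by decide) (by decide)
  have hss : PySem.Chars.endswith s.toList "s".toList = false :=
    endswith_tail_ne s _ 's' h (by decide) (by decide)
  have hies' : PySem.Str.endswith s "ies" = false := hies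
  have hss' : PySem.Str.endswith s "s" = false := hss
  unfold singularize
  simp only [hies', hss', Bool.false_eq_true, if_false]

theorem wrapB_last (n : Nat) (x : String) :
    (wrapB (n + 1) x).toList.getLast? = some ')' := by
  rw [wrapB_succ]
  rw [show ("list(" ++ wrapB n x ++ ")").toList
      = ("list(".toList ++ (wrapB n x).toList) ++ [')'] from by simp]
  exact List.getLast?_concat

theorem ct_list_step (subtype : Option String) :
    cleanup_type (some "list") subtype
      = "list(" ++ singularize (cleanup_type subtype none) ++ ")" := by
  rw [cleanup_type]
  simp

theorem alt_peel (w : Nat) (c : Option String) (atype subtype : Option String)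
    (h : peelB atype subtype 0 = (w, c)) :
    cleanup_type_alt atype subtype
      = if w == 0 then baseB c else wrapB w (singularize (baseB c)) := by
  simp [cleanup_type_alt, h]

theorem main_aux (n : Nat) : ∀ (atype subtype : Option String), pvMu atype + pvMu subtype ≤ n →
    cleanup_type atype subtype = cleanup_type_alt atype subtype := by
  induction n using Nat.strong_induction_on with
  | _ n ih =>
    intro atype subtype hle
    match atype with
    | none => simp [cleanup_type, cleanup_type_alt, peelB_none, baseB]
    | some a =>
      by_cases h0 : (a == "-" || a == "None" || a == "NoneType" || a == "") = true
      · have : ((a = "-" ∨ a = "None") ∨ a = "NoneType") ∨ a = "" := by simpa using h0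
        rcases this with ((h | h) | h) | h <;> subst h <;>
          · rw [cleanup_type]
            rw [alt_peel 0 (some _) _ subtype (peelB_other _ subtype 0 (by decide) (by decide))]
            simp [baseB]
      · have h0' := eq_false_of_ne_true h0
        by_cases hd : (a == "dict") = true
        · have ha : a = "dict" := by simpa using hd
          subst ha
          rw [cleanup_type]
          rw [alt_peel 0 (some "dict") _ subtype
            (peelB_other _ subtype 0 (by decide) (by decide))]
          simp [baseB]
        · have hd' := eq_false_of_ne_true hd
          by_cases hl : (a == "list") = true
          · have ha : a = "list" := by simpa using hl
            subst ha
            rw [ct_list_step]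
            have hmn : pvMu subtype + pvMu (none : Option String) < n := by
              have h4 : pvMu (some ("list" : String)) = 4 := by decide
              simp only [pvMu, Option.map_none, Option.getD_none] at *
              omega
            rw [ih _ hmn subtype none le_rfl]
            obtain ⟨w', c', hp⟩ : ∃ w' c', peelB subtype none 0 = (w', c') :=
              ⟨_, _, rfl⟩
            have hshift : peelB subtype none 1 = (w' + 1, c') := by
              rw [peelB_shift, hp]
            rw [alt_peel (w' + 1) c' (some "list") subtype
              (by rw [peelB_list, hshift])]
            rw [alt_peel w' c' subtype none hp]
            cases w' with
            | zero => simp [wrapB]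
            | succ k =>
              have hsing := singularize_paren _ (wrapB_last k (singularize (baseB c')))
              rw [if_neg (by simp), if_neg (by simp)]
              rw [hsing, wrapB_succ (k + 1)]
          · have hl' := eq_false_of_ne_true hl
            by_cases hs : PySem.Str.startswith a "list of " = true
            · rw [cleanup_type]
              simp only [h0', hd', hl', hs, Bool.false_eq_true, if_false, if_true]
              have h8 := pvTail_len a hs
              have hmn2 : pvMu (some ("list" : String))
                  + pvMu (some (PySem.Str.strip (PySem.Str.slice a (some 8) none))) < n := by
                have h4 : pvMu (some ("list" : String)) = 4 := by decide
                simp only [pvMu, Option.map_some, Option.getD_some] at *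
                omega
              rw [ih _ hmn2 _ _ le_rfl]
              obtain ⟨w2, c2, hq⟩ : ∃ w2 c2,
                  peelB (some (PySem.Str.strip (PySem.Str.slice a (some 8) none))) none 1
                    = (w2, c2) := ⟨_, _, rfl⟩
              rw [alt_peel w2 c2 (some "list") _ (by rw [peelB_list]; exact hq)]
              rw [alt_peel w2 c2 (some a) subtype
                (by rw [peelB_listof a subtype 0 hl' hs]; exact hq)]
            · have hs' := eq_false_of_ne_true hs
              rw [cleanup_type]
              simp only [h0', hd', hl', hs', Bool.false_eq_true, if_false]
              rw [alt_peel 0 (some a) _ subtype (peelB_other a subtype 0 hl' hs')]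
              simp [baseB, h0', hd']

theorem main_eq (atype subtype : Option String) :
    cleanup_type atype subtype = cleanup_type_alt atype subtype :=
  main_aux (pvMu atype + pvMu subtype) atype subtype le_rfl

-- ===== VERDICT (by name: the statement is the Claim_ definition above) =====
theorem cleanup_type_spec : Claim_equal_cleanup_type := by
  intro atype subtype _
  unfold Spec_cleanup_type
  exact main_eq atype subtype
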